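-- pv_equiv track=rewrite | github.com/zebajoao/ufba | estrutura_de_dados_e_algoritmos/eda_exercicio_3_pertence.py | pertence
-- ===== SOURCE A (Python) =====
-- def pertence(vetor1, vetor2):
--     soma = 0
--     lista = []
--     for i in vetor1:
--         if i in vetor2 and i not in lista:
--             lista.append(i)
--             soma += i
--     return soma
-- ===== SOURCE B (Python) =====
-- def pertence(vetor1, vetor2):
--     return sum(set(vetor1) & set(vetor2))
-- ===== Notes on version B (the rewrite author's own statement) =====
-- stated objective: idiomatic
-- what changed: Replaces the membership-test loop with an explicit seen-list accumulator by a single set-intersection of the two inputs followed by sum.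
import Mathlib
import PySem

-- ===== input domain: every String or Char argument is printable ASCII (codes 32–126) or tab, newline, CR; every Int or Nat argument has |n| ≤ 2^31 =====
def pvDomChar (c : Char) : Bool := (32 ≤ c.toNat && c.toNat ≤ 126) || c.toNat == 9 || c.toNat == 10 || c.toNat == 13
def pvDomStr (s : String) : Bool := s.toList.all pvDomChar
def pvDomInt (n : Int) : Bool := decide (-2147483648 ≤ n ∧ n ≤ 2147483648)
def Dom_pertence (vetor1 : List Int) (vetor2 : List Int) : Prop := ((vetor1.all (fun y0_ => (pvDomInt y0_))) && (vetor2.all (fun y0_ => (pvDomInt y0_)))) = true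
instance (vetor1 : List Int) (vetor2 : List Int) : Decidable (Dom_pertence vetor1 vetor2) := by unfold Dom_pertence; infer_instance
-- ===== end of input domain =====

-- B computes sum(set(vetor1) & set(vetor2)): one set intersection + sum instead of a loop with a seen-list (idiomatic).
-- ===== PORT A =====
def pertence (vetor1 : List Int) (vetor2 : List Int) : Int :=
  (vetor1.foldl
    (fun (st : Int × List Int) i =>
      if vetor2.contains i && !(st.2.contains i) then (st.1 + i, st.2 ++ [i]) else st)
    (0, ([] : List Int))).1

-- ===== PORT B =====
def pertence_alt (vetor1 : List Int) (vetor2 : List Int) : Int :=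
  (PySem.Set.inter (PySem.Set.ofList vetor1) (PySem.Set.ofList vetor2)).sum

-- ===== PRECONDITION & SPEC =====
def Spec_pertence (vetor1 : List Int) (vetor2 : List Int) (out : Int) : Prop := out = pertence_alt vetor1 vetor2
instance (vetor1 : List Int) (vetor2 : List Int) (out : Int) : Decidable (Spec_pertence vetor1 vetor2 out) := by unfold Spec_pertence; infer_instance

-- ===== CLAIM (what is proved, stated in full; the proofs are below) =====
def Claim_equal_pertence : Prop := ∀ (vetor1 : List Int) (vetor2 : List Int), Dom_pertence vetor1 vetor2 → Spec_pertence vetor1 vetor2 (pertence vetor1 vetor2)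

-- ===== LEMMAS AND PROOFS =====
lemma pertence_fold_inv (vetor2 : List Int) :
    ∀ (v1 : List Int) (s : Int) (l : List Int),
      (v1.foldl
        (fun (st : Int × List Int) i =>
          if vetor2.contains i && !(st.2.contains i) then (st.1 + i, st.2 ++ [i]) else st)
        (s, l))
      = (s + ((v1.filter (fun i => vetor2.contains i)).foldl PySem.Set.add l).sum - l.sum,
         (v1.filter (fun i => vetor2.contains i)).foldl PySem.Set.add l) := by
  intro v1
  induction v1 with
  | nil => intro s l; simp
  | cons i rest ih =>
    intro s l
    rw [List.foldl_cons]
    by_cases h2 : vetor2.contains i = true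
    · rw [List.filter_cons_of_pos h2, List.foldl_cons]
      by_cases hl : l.contains i = true
      · have hadd : PySem.Set.add l i = l :=
          PySem.Set.add_of_mem (by simpa using hl)
        rw [if_neg (by simp; exact fun _ => by simpa using hl), hadd]
        exact ih s l
      · have hadd : PySem.Set.add l i = l ++ [i] :=
          PySem.Set.add_of_not_mem (by simpa using hl)
        rw [if_pos (by simp; exact ⟨by simpa using h2, by simpa using hl⟩), hadd, ih (s + i) (l ++ [i])]
        have : (l ++ [i]).sum = l.sum + i := by simp
        rw [this]
        congr 1
        ring
    · rw [List.filter_cons_of_neg h2, if_neg (by simp; exact fun h => absurd (by simpa using h) h2)]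
      exact ih s l

lemma pertence_eq_sum_ofList_filter (v1 v2 : List Int) :
    pertence v1 v2 = (PySem.Set.ofList (v1.filter (fun i => v2.contains i))).sum := by
  unfold pertence
  rw [pertence_fold_inv]
  simp [PySem.Set.ofList_eq_foldl]


-- ===== VERDICT (by name: the statement is the Claim_ definition above) =====
theorem pertence_spec : Claim_equal_pertence := by
  unfold Claim_equal_pertence
  intro v1 v2 _
  unfold Spec_pertence pertence_alt
  rw [pertence_eq_sum_ofList_filter]
  have hperm : (PySem.Set.ofList (v1.filter (fun i => v2.contains i))).Perm
      (PySem.Set.inter (PySem.Set.ofList v1) (PySem.Set.ofList v2)) := by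
    apply (List.perm_ext_iff_of_nodup (PySem.Set.nodup_ofList _)
      (PySem.Set.nodup_inter _ _ (PySem.Set.nodup_ofList _))).2
    intro x
    simp [PySem.Set.mem_ofList, PySem.Set.mem_inter, List.mem_filter]
  exact hperm.sum_eq
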